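-- pv_equiv track=rewrite | github.com/saytakov/CodeRun | t-bank/4/main.py | _build_digits_of_number
-- ===== SOURCE A (Python) =====
-- def _build_digits_of_number(numbers: list[str]):
--     digits_of_number: list[list[str]] = [[] for _ in range(9)]
--     for number in numbers:
--         number = number[::-1]
--         for i_digit in range(len(number)):
--             digits_of_number[i_digit].append(number[i_digit])
--     for i in range(len(digits_of_number)):
--         digits_of_number[i].sort()
--     return digits_of_number
-- ===== SOURCE B (Python) =====
-- def _build_digits_of_number(numbers: list[str]):
--     # counting sort per bucket: tally character codes by reversed position, then emit in code order (alternative algorithm)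
--     counts = [[0] * 128 for _ in range(9)]
--     for number in numbers:
--         for i, ch in enumerate(reversed(number)):
--             counts[i][ord(ch)] += 1
--     return [[chr(v) for v in range(128) for _ in range(row[v])] for row in counts]
-- ===== Notes on version B (the rewrite author's own statement) =====
-- stated objective: alternative
-- what changed: Replaces A's per-bucket comparison sort (list.sort on each of the 9 buckets) by a single tally pass into a 9x128 table of character-code counts followed by an in-order emission (counting sort).
import Mathlib
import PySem

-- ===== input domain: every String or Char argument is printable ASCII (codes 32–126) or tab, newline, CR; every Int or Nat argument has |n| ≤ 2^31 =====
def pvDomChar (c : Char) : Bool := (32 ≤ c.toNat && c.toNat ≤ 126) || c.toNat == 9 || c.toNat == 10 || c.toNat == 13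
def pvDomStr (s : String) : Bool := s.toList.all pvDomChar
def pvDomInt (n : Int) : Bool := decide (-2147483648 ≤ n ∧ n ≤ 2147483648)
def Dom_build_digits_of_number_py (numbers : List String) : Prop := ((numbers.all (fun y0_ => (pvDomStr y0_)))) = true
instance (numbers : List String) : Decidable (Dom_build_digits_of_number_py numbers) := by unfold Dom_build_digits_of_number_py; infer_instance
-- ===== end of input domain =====

-- B replaces A's per-bucket comparison sort by a counting sort over the 128 ASCII character codes (objective: alternative algorithm).

-- ===== PORT A =====
-- digits_of_number[i].append(s); out-of-range i (impossible under Pre_) is a no-op here where Python raises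
def pyAppend (bs : List (List String)) (i : Nat) (s : String) : List (List String) :=
  bs.set i (bs.getD i [] ++ [s])

-- 'for i_digit in range(len(number)): digits_of_number[i_digit].append(number[i_digit])' on the reversed char list
def fillA : List (List String) → List Char → Nat → List (List String)
  | bs, [], _ => bs
  | bs, c :: rest, i => fillA (pyAppend bs i (String.ofList [c])) rest (i + 1)

def build_digits_of_number_py (numbers : List String) : List (List String) :=
  (numbers.foldl (fun acc number => fillA acc number.toList.reverse 0)
    (List.replicate 9 [])).map (fun b => PySem.List.sorted b (fun x => x) false)

-- ===== PORT B =====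
-- counts[i][ord(ch)] += 1; out-of-range i (impossible under Pre_) is a no-op here where Python raises
def bumpAt (cnt : List (List Int)) (i v : Nat) : List (List Int) :=
  cnt.set i ((cnt.getD i []).set v ((cnt.getD i []).getD v 0 + 1))

-- 'for i, ch in enumerate(reversed(number)): counts[i][ord(ch)] += 1'
def fillB : List (List Int) → List Char → Nat → List (List Int)
  | cnt, [], _ => cnt
  | cnt, c :: rest, i => fillB (bumpAt cnt i c.toNat) rest (i + 1)

-- '[chr(v) for v in range(128) for _ in range(row[v])]'
def emitRow (row : List Int) : List String :=
  (List.range 128).flatMap (fun v => List.replicate (row.getD v 0).toNat (String.ofList [Char.ofNat v]))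

def build_digits_of_number_py_alt (numbers : List String) : List (List String) :=
  (numbers.foldl (fun acc number => fillB acc number.toList.reverse 0)
    (List.replicate 9 (List.replicate 128 0))).map emitRow

-- ===== PRECONDITION & SPEC =====
-- Pre_ excludes exactly the inputs on which A raises IndexError: a string of more than 9 characters
-- makes A index digits_of_number[9] (only 9 buckets exist).
def Pre_build_digits_of_number_py (numbers : List String) : Prop :=
  ∀ s ∈ numbers, s.toList.length ≤ 9
instance (numbers : List String) : Decidable (Pre_build_digits_of_number_py numbers) := by
  unfold Pre_build_digits_of_number_py; infer_instance
def pvWitness_build_digits_of_number_py : List String := ["123", "40", "9"]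

def Spec_build_digits_of_number_py (numbers : List String) (out : List (List String)) : Prop := out = build_digits_of_number_py_alt numbers
instance (numbers : List String) (out : List (List String)) : Decidable (Spec_build_digits_of_number_py numbers out) := by unfold Spec_build_digits_of_number_py; infer_instance

-- ===== CLAIM (what is proved, stated in full; the proofs are below) =====
def Claim_equal_build_digits_of_number_py : Prop := ∀ (numbers : List String), Dom_build_digits_of_number_py numbers → Pre_build_digits_of_number_py numbers → Spec_build_digits_of_number_py numbers (build_digits_of_number_py numbers)

-- ===== LEMMAS AND PROOFS =====

theorem charOfNat_toNat : ∀ v : Nat, v < 128 → (Char.ofNat v).toNat = v := by decide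

theorem charOfNat_lt (v : Nat) (hv : v < 128) (w : Nat) (hw : w < 128) (hvw : v < w) :
    Char.ofNat v < Char.ofNat w := by
  rw [Char.lt_def, UInt32.lt_iff_toNat_lt]
  show (Char.ofNat v).toNat < (Char.ofNat w).toNat
  rw [charOfNat_toNat v hv, charOfNat_toNat w hw]
  exact hvw

theorem ofList_singleton_inj (a b : Char) : String.ofList [a] = String.ofList [b] ↔ a = b := by
  constructor
  · intro h
    have h2 := congrArg String.toList h
    simpa using h2
  · rintro rfl; rfl

theorem ofList_singleton_le (a b : Char) (h : a < b) :
    String.ofList [a] ≤ String.ofList [b] := by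
  apply le_of_lt
  rw [String.lt_iff_toList_lt]
  simp only [String.toList_ofList]
  exact (List.lt_iff_lex_lt _ _).mp ((List.lt_iff_lex_lt _ _).mpr (List.Lex.rel h))

theorem getD_set_lt {α : Type} (l : List α) (i j : Nat) (a d : α) (hi : i < l.length) :
    (l.set i a).getD j d = if i = j then a else l.getD j d := by
  rcases eq_or_ne i j with rfl | hne
  · simp [List.getD_eq_getElem?_getD, hi]
  · simp [List.getD_eq_getElem?_getD, hne]

def GoodRow (row : List Int) (b : List String) : Prop :=
  row.length = 128 ∧
  (∀ v : Nat, v < 128 → row.getD v 0 = (b.count (String.ofList [Char.ofNat v]) : Int)) ∧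
  (∀ s ∈ b, ∃ c : Char, c.toNat < 128 ∧ s = String.ofList [c])

def BInv (bs : List (List String)) (cnt : List (List Int)) : Prop :=
  bs.length = 9 ∧ cnt.length = 9 ∧ ∀ j : Nat, j < 9 → GoodRow (cnt.getD j []) (bs.getD j [])

theorem inv_bump (bs : List (List String)) (cnt : List (List Int)) (i : Nat) (c : Char)
    (h : BInv bs cnt) (hi : i < 9) (hc : c.toNat < 128) :
    BInv (pyAppend bs i (String.ofList [c])) (bumpAt cnt i c.toNat) := by
  obtain ⟨hlb, hlc, hrows⟩ := h
  refine ⟨by simp [pyAppend, hlb], by simp [bumpAt, hlc], ?_⟩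
  intro j hj
  rcases eq_or_ne i j with rfl | hne
  · obtain ⟨hrl, hcnt, hform⟩ := hrows i hi
    rw [pyAppend, bumpAt, getD_set_lt bs i i _ [] (by omega), getD_set_lt cnt i i _ [] (by omega),
      if_pos rfl, if_pos rfl]
    refine ⟨by rw [List.length_set]; exact hrl, ?_, ?_⟩
    · intro v hv
      rw [getD_set_lt _ _ _ _ _ (by omega : c.toNat < (cnt.getD i []).length), List.count_append]
      rcases eq_or_ne (c.toNat) v with rfl | hne2
      · rw [if_pos rfl, hcnt c.toNat hc, Char.ofNat_toNat]
        simp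
      · rw [if_neg hne2, hcnt v hv]
        have hne3 : String.ofList [Char.ofNat v] ≠ String.ofList [c] := by
          intro hEq
          have := (ofList_singleton_inj _ _).mp hEq
          exact hne2 (by rw [← this, charOfNat_toNat v hv])
        have hne4 : String.ofList [c] ≠ String.ofList [Char.ofNat v] := fun hEq => hne3 hEq.symm
        simp [hne4]
    · intro s hs
      rcases List.mem_append.mp hs with hs | hs
      · exact hform s hs
      · exact ⟨c, hc, List.mem_singleton.mp hs⟩
  · rw [pyAppend, bumpAt, getD_set_lt bs i j _ [] (by omega), getD_set_lt cnt i j _ [] (by omega),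
      if_neg hne, if_neg hne]
    exact hrows j hj

theorem inv_fill (L : List Char) (bs : List (List String)) (cnt : List (List Int)) (i : Nat)
    (hL : ∀ c ∈ L, c.toNat < 128) (hlen : i + L.length ≤ 9) (h : BInv bs cnt) :
    BInv (fillA bs L i) (fillB cnt L i) := by
  induction L generalizing bs cnt i with
  | nil => simpa [fillA, fillB]
  | cons c rest ih =>
    simp only [fillA, fillB]
    apply ih
    · intro x hx; exact hL x (List.mem_cons_of_mem _ hx)
    · simp only [List.length_cons] at hlen; omega
    · exact inv_bump bs cnt i c h (by simp only [List.length_cons] at hlen; omega)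
        (hL c (List.mem_cons_self))

theorem inv_init : BInv (List.replicate 9 []) (List.replicate 9 (List.replicate 128 0)) := by
  refine ⟨by simp, by simp, ?_⟩
  intro j hj
  rw [List.getD_eq_getElem?_getD, List.getD_eq_getElem?_getD, List.getElem?_replicate,
    if_pos (by omega : j < 9), List.getElem?_replicate, if_pos (by omega : j < 9)]
  refine ⟨by simp, ?_, by simp⟩
  intro v hv
  rw [Option.getD_some, Option.getD_some, List.getD_eq_getElem?_getD, List.getElem?_replicate,
    if_pos hv]
  simp

theorem sum_map_single (k m : Nat) : ∀ n : Nat, k < n →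
    ((List.range n).map (fun v => if v = k then m else 0)).sum = m := by
  intro n
  induction n with
  | zero => omega
  | succ n ih =>
    intro hk
    rw [List.range_succ, List.map_append, List.sum_append]
    rcases eq_or_ne k n with rfl | hne
    · have hz : ((List.range k).map (fun v => if v = k then m else 0)).sum = 0 := by
        apply List.sum_eq_zero
        intro x hx
        rcases List.mem_map.mp hx with ⟨v, hv, rfl⟩
        simp [Nat.ne_of_lt (List.mem_range.mp hv)]
      simp [hz]
    · rw [ih (by omega)]
      simp [Ne.symm hne]

theorem emit_sorted (b : List String) (row : List Int) (h : GoodRow row b) :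
    PySem.List.sorted b (fun x => x) false = emitRow row := by
  obtain ⟨hrl, hcnt, hform⟩ := h
  have hemit : emitRow row =
      (List.range 128).flatMap (fun v => List.replicate (b.count (String.ofList [Char.ofNat v]))
        (String.ofList [Char.ofNat v])) := by
    rw [emitRow, List.flatMap_def, List.flatMap_def]
    congr 1
    apply List.map_congr_left
    intro v hv
    rw [hcnt v (List.mem_range.mp hv)]
    simp
  rw [hemit]
  apply PySem.List.sorted_id_eq_of_perm_of_pairwise
  · rw [List.perm_iff_count]
    intro a
    rw [List.count_flatMap]
    by_cases ha : ∃ c : Char, c.toNat < 128 ∧ a = String.ofList [c]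
    · obtain ⟨c, hc, rfl⟩ := ha
      have hmap : (List.range 128).map (List.count (String.ofList [c]) ∘
          fun v => List.replicate (b.count (String.ofList [Char.ofNat v])) (String.ofList [Char.ofNat v])) =
          (List.range 128).map (fun v => if v = c.toNat then b.count (String.ofList [c]) else 0) := by
        apply List.map_congr_left
        intro v hv
        have hv128 := List.mem_range.mp hv
        simp only [Function.comp_apply, List.count_replicate]
        rcases eq_or_ne v (c.toNat) with rfl | hne
        · rw [Char.ofNat_toNat]
          simp
        · have hne3 : String.ofList [Char.ofNat v] ≠ String.ofList [c] := by
            intro hEq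
            have := (ofList_singleton_inj _ _).mp hEq
            exact hne (by rw [← this, charOfNat_toNat v hv128])
          simp [hne3, if_neg hne]
      rw [hmap, sum_map_single _ _ _ hc]
    · rw [not_exists] at ha
      simp only [not_and] at ha
      have hb0 : b.count a = 0 := by
        rw [List.count_eq_zero]
        intro hmem
        obtain ⟨c, hc, rfl⟩ := hform a hmem
        exact (ha c hc) rfl
      rw [hb0]
      apply List.sum_eq_zero
      intro x hx
      rcases List.mem_map.mp hx with ⟨v, hv, rfl⟩
      have hv128 := List.mem_range.mp hv
      have hne : String.ofList [Char.ofNat v] ≠ a :=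
        fun hEq => (ha (Char.ofNat v) (by rw [charOfNat_toNat v hv128]; exact hv128)) hEq.symm
      simp [Function.comp_apply, List.count_replicate, hne]
  · rw [List.pairwise_flatMap]
    constructor
    · intro v hv
      exact List.pairwise_replicate.mpr (Or.inr le_rfl)
    · apply List.Pairwise.imp_of_mem ?_ List.pairwise_lt_range
      intro v w hv hw hvw x hx y hy
      have hv128 := List.mem_range.mp hv
      have hw128 := List.mem_range.mp hw
      rw [List.eq_of_mem_replicate hx, List.eq_of_mem_replicate hy]
      exact ofList_singleton_le _ _ (charOfNat_lt v hv128 w hw128 hvw)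

theorem inv_foldl (numbers : List String) (bs : List (List String)) (cnt : List (List Int))
    (hdom : ∀ s ∈ numbers, ∀ c ∈ s.toList, c.toNat < 128)
    (hpre : ∀ s ∈ numbers, s.toList.length ≤ 9)
    (h : BInv bs cnt) :
    BInv (numbers.foldl (fun acc number => fillA acc number.toList.reverse 0) bs)
        (numbers.foldl (fun acc number => fillB acc number.toList.reverse 0) cnt) := by
  induction numbers generalizing bs cnt with
  | nil => simpa
  | cons s rest ih =>
    simp only [List.foldl_cons]
    apply ih
    · intro x hx; exact hdom x (List.mem_cons_of_mem _ hx)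
    · intro x hx; exact hpre x (List.mem_cons_of_mem _ hx)
    · apply inv_fill
      · intro c hc; exact hdom s List.mem_cons_self c (List.mem_reverse.mp hc)
      · simpa using hpre s List.mem_cons_self
      · exact h

-- ===== VERDICT (by name: the statement is the Claim_ definition above) =====
theorem build_digits_of_number_py_spec : Claim_equal_build_digits_of_number_py := by
  intro numbers hdom hpre
  unfold Spec_build_digits_of_number_py build_digits_of_number_py build_digits_of_number_py_alt
  have hdom' : ∀ s ∈ numbers, ∀ c ∈ s.toList, c.toNat < 128 := by
    intro s hs c hc
    unfold Dom_build_digits_of_number_py at hdom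
    rw [List.all_eq_true] at hdom
    have h1 := hdom s hs
    unfold pvDomStr at h1
    rw [List.all_eq_true] at h1
    have h2 := h1 c hc
    unfold pvDomChar at h2
    simp only [Bool.or_eq_true, Bool.and_eq_true, decide_eq_true_eq, beq_iff_eq] at h2
    omega
  have hinv := inv_foldl numbers (List.replicate 9 []) (List.replicate 9 (List.replicate 128 0)) hdom' hpre inv_init
  obtain ⟨hlb, hlc, hrows⟩ := hinv
  apply List.ext_getElem
  · rw [List.length_map, List.length_map, hlb, hlc]
  · intro j h1 h2
    simp only [List.getElem_map]
    have hj : j < 9 := by rw [List.length_map, hlb] at h1; exact h1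
    have hg := hrows j hj
    rw [List.getD_eq_getElem _ _ (by omega), List.getD_eq_getElem _ _ (by omega)] at hg
    exact emit_sorted _ _ hg
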